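-- pv_equiv track=rewrite | github.com/a77med-Ibrahim/AlgoLingo_Senior_Project | back_end/back_end/functions.py | check_heap
-- ===== SOURCE A (Python) =====
-- def check_heap(heap, is_max_heap):
--     def is_max_heap_func(heap):
--         for i in range(len(heap)):
--             left = 2 * i + 1
--             right = 2 * i + 2
--             if (left < len(heap) and heap[i]["number"] < heap[left]["number"]) or (right < len(heap) and heap[i]["number"] < heap[right]["number"]):
--                 return False
--         return True
--
--     def is_min_heap_func(heap):
--         for i in range(len(heap)):
--             left = 2 * i + 1
--             right = 2 * i + 2
--             if (left < len(heap) and heap[i]["number"] > heap[left]["number"]) or (right < len(heap) and heap[i]["number"] > heap[right]["number"]):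
--                 return False
--         return True
--
--     if is_max_heap:
--         return is_max_heap_func(heap)
--     else:
--         return is_min_heap_func(heap)
-- ===== SOURCE B (Python) =====
-- def check_heap(heap, is_max_heap):
--     # Bottom-up subtree-extremum pass: ext[i] becomes the max (min) of the whole
--     # subtree rooted at i; the heap property holds iff every node already equals
--     # its subtree extremum.
--     n = len(heap)
--     ext = [row["number"] for row in heap]
--     best = max if is_max_heap else min
--     for i in range(n - 1, -1, -1):
--         for c in (2 * i + 1, 2 * i + 2):
--             if c < n:
--                 ext[i] = best(ext[i], ext[c])
--     return all(ext[i] == heap[i]["number"] for i in range(n))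
-- ===== Notes on version B (the rewrite author's own statement) =====
-- stated objective: alternative
-- what changed: Instead of testing each parent against its children, B computes every subtree's extremum (max or min, chosen from is_max_heap) in one bottom-up pass and reports True iff each node equals its own subtree extremum.
-- outside the precondition, e.g. on check_heap([{}], True): A returns True, B raises KeyError; on check_heap([{'number': 1}, {'number': 2}, {}], True): A returns False, B raises KeyError
import Mathlib
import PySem

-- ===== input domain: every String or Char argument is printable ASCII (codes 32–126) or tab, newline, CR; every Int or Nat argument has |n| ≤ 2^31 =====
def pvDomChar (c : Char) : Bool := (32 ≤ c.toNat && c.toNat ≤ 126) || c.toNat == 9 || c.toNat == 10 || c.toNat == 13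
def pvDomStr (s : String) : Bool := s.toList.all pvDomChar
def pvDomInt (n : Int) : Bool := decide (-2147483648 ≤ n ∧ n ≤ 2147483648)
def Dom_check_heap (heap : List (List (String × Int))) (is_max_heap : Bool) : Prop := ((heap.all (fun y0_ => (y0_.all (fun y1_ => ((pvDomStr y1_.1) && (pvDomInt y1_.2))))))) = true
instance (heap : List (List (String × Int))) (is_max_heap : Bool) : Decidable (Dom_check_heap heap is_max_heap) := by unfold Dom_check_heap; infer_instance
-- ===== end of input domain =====

-- B replaces A's parent-vs-children comparisons by a different algorithm: a bottom-up pass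
-- computing every subtree's extremum, then checking each node equals its subtree extremum
-- (objective: alternative; same O(n) cost).

-- ===== PORT A =====
-- row["number"]: first-match lookup; the default 0 is only reached outside Pre_ (Python raises KeyError there)
def pvNum (row : List (String × Int)) : Int := ((PySem.Dict.mk row).get? "number").getD 0

def pvIsMaxHeapFunc (heap : List (List (String × Int))) : Bool :=
  (List.range heap.length).all (fun i =>
    let left := 2 * i + 1
    let right := 2 * i + 2
    !((decide (left < heap.length) && decide (pvNum (heap.getD i []) < pvNum (heap.getD left []))) ||
      (decide (right < heap.length) && decide (pvNum (heap.getD i []) < pvNum (heap.getD right [])))))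

def pvIsMinHeapFunc (heap : List (List (String × Int))) : Bool :=
  (List.range heap.length).all (fun i =>
    let left := 2 * i + 1
    let right := 2 * i + 2
    !((decide (left < heap.length) && decide (pvNum (heap.getD i []) > pvNum (heap.getD left []))) ||
      (decide (right < heap.length) && decide (pvNum (heap.getD i []) > pvNum (heap.getD right [])))))

def check_heap (heap : List (List (String × Int))) (is_max_heap : Bool) : Bool :=
  if is_max_heap then pvIsMaxHeapFunc heap else pvIsMinHeapFunc heap

-- ===== PORT B =====
-- inner loop 'for c in (2*i+1, 2*i+2): if c < n: ext[i] = best(ext[i], ext[c])'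
def pvSink (n : Nat) (best : Int → Int → Int) (e : List Int) (i : Nat) : List Int :=
  [2 * i + 1, 2 * i + 2].foldl
    (fun e c => if c < n then e.set i (best (e.getD i 0) (e.getD c 0)) else e) e

def check_heap_alt (heap : List (List (String × Int))) (is_max_heap : Bool) : Bool :=
  let n := heap.length
  let ext0 := heap.map (fun row => pvNum row)
  let best : Int → Int → Int := if is_max_heap then (fun a b => max a b) else (fun a b => min a b)
  let ext := ((List.range n).reverse).foldl (pvSink n best) ext0   -- range(n-1, -1, -1)
  (List.range n).all (fun i => ext.getD i 0 == pvNum (heap.getD i []))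

-- ===== PRECONDITION & SPEC =====
-- Pre_ requires every row to contain the "number" key: on a heap with a keyless row both
-- programs may raise KeyError, and B (which reads every row up front) always raises there,
-- while A sometimes returns first thanks to its short-circuit scan order.
def Pre_check_heap (heap : List (List (String × Int))) (is_max_heap : Bool) : Prop :=
  (heap.all (fun row => (PySem.Dict.mk row).contains "number")) = true
instance (heap : List (List (String × Int))) (is_max_heap : Bool) : Decidable (Pre_check_heap heap is_max_heap) := by unfold Pre_check_heap; infer_instance

def pvWitness_check_heap : (List (List (String × Int))) × Bool :=
  ([[("number", 3)], [("number", 1)], [("number", 2)]], true)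

def Spec_check_heap (heap : List (List (String × Int))) (is_max_heap : Bool) (out : Bool) : Prop := out = check_heap_alt heap is_max_heap
instance (heap : List (List (String × Int))) (is_max_heap : Bool) (out : Bool) : Decidable (Spec_check_heap heap is_max_heap out) := by unfold Spec_check_heap; infer_instance

-- ===== CLAIM (what is proved, stated in full; the proofs are below) =====
def Claim_equal_check_heap : Prop := ∀ (heap : List (List (String × Int))) (is_max_heap : Bool), Dom_check_heap heap is_max_heap → Pre_check_heap heap is_max_heap → Spec_check_heap heap is_max_heap (check_heap heap is_max_heap)

-- ===== LEMMAS AND PROOFS =====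

-- the subtree extremum B's backward pass computes at each index
def pvM (n : Nat) (best : Int → Int → Int) (num : Nat → Int) (i : Nat) : Int :=
  if _h2 : 2 * i + 2 < n then
    best (if _h1 : 2 * i + 1 < n then best (num i) (pvM n best num (2 * i + 1)) else num i)
         (pvM n best num (2 * i + 2))
  else
    if _h1 : 2 * i + 1 < n then best (num i) (pvM n best num (2 * i + 1)) else num i
termination_by n - i
decreasing_by all_goals omega

lemma pvGetD_set (e : List Int) (i j : Nat) (v : Int) :
    (e.set i v).getD j 0 = if i = j ∧ i < e.length then v else e.getD j 0 := by
  simp only [List.getD_eq_getElem?_getD, List.getElem?_set]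
  by_cases hij : i = j
  · subst hij
    by_cases hlen : i < e.length <;> simp [hlen]
  · simp [hij]

lemma pvSink_length (n : Nat) (best : Int → Int → Int) (e : List Int) (i : Nat) :
    (pvSink n best e i).length = e.length := by
  simp only [pvSink, List.foldl]
  split_ifs <;> simp

lemma pvFold_length (n : Nat) (best : Int → Int → Int) (l : List Nat) (e : List Int) :
    (l.foldl (pvSink n best) e).length = e.length := by
  induction l generalizing e with
  | nil => rfl
  | cons a l ih => simp [List.foldl, ih, pvSink_length]

-- invariant of the backward pass: indices ≥ k already hold their subtree extremum
lemma pvFoldInv (n : Nat) (best : Int → Int → Int) (e0 : List Int) (hlen : e0.length = n) :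
    ∀ k, k ≤ n → ∀ j,
      (((List.range' k (n - k)).reverse).foldl (pvSink n best) e0).getD j 0
        = if k ≤ j ∧ j < n then pvM n best (fun t => e0.getD t 0) j else e0.getD j 0 := by
  intro k hk
  induction hn : n - k generalizing k with
  | zero =>
    intro j
    have hkeq : k = n := by omega
    subst hkeq
    simp only [List.range', List.reverse_nil, List.foldl_nil]
    rw [if_neg (by omega)]
  | succ m ih =>
    intro j
    have hkn : k < n := by omega
    rw [List.range'_succ, List.reverse_cons, List.foldl_append, List.foldl_cons, List.foldl_nil]
    set E := ((List.range' (k + 1) m).reverse).foldl (pvSink n best) e0 with hE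
    have hElen : E.length = n := by rw [hE, pvFold_length, hlen]
    have hIH : ∀ j, E.getD j 0 = if k + 1 ≤ j ∧ j < n then pvM n best (fun t => e0.getD t 0) j else e0.getD j 0 :=
      ih (k + 1) (by omega) (by omega)
    have hEk : E.getD k 0 = e0.getD k 0 := by rw [hIH, if_neg (by omega)]
    have hEc1 : 2 * k + 1 < n → E.getD (2 * k + 1) 0 = pvM n best (fun t => e0.getD t 0) (2 * k + 1) := by
      intro h; rw [hIH, if_pos (by omega)]
    have hEc2 : 2 * k + 2 < n → E.getD (2 * k + 2) 0 = pvM n best (fun t => e0.getD t 0) (2 * k + 2) := by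
      intro h; rw [hIH, if_pos (by omega)]
    have hTail : ∀ (hjk : k ≠ j),
        (if k ≤ j ∧ j < n then pvM n best (fun t => e0.getD t 0) j else e0.getD j 0)
          = E.getD j 0 := by
      intro hjk
      rw [hIH]
      by_cases h : k + 1 ≤ j ∧ j < n
      · rw [if_pos h, if_pos (by omega)]
      · rw [if_neg h, if_neg (by omega)]
    simp only [pvSink, List.foldl_cons, List.foldl_nil]
    by_cases hc1 : 2 * k + 1 < n <;> by_cases hc2 : 2 * k + 2 < n
    · -- both children
      rw [if_pos hc1, if_pos hc2]
      by_cases hjk : k = j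
      · subst hjk
        rw [if_pos ⟨le_refl _, hkn⟩]
        rw [pvGetD_set]
        rw [if_pos ⟨rfl, by rw [List.length_set, hElen]; exact hkn⟩]
        rw [pvGetD_set, if_pos ⟨rfl, by rw [hElen]; exact hkn⟩]
        rw [pvGetD_set, if_neg (by omega)]
        rw [hEk, hEc1 hc1, hEc2 hc2]
        conv_rhs => rw [pvM]
        rw [dif_pos hc2, dif_pos hc1]
      · rw [hTail hjk, pvGetD_set, if_neg (by
            intro hcon; exact hjk hcon.1), pvGetD_set, if_neg (by
            intro hcon; exact hjk hcon.1)]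
    · -- only left child
      rw [if_pos hc1, if_neg hc2]
      by_cases hjk : k = j
      · subst hjk
        rw [if_pos ⟨le_refl _, hkn⟩]
        rw [pvGetD_set, if_pos ⟨rfl, by rw [hElen]; exact hkn⟩]
        rw [hEk, hEc1 hc1]
        conv_rhs => rw [pvM]
        rw [dif_neg hc2, dif_pos hc1]
      · rw [hTail hjk, pvGetD_set, if_neg (by intro hcon; exact hjk hcon.1)]
    · omega
    · -- no children
      rw [if_neg hc1, if_neg hc2]
      by_cases hjk : k = j
      · subst hjk
        rw [if_pos ⟨le_refl _, hkn⟩, hEk]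
        conv_rhs => rw [pvM]
        rw [dif_neg hc2, dif_neg hc1]
      · rw [hTail hjk]

-- B's fixed-point test ↔ the parent-dominates-children property
lemma pvM_fixed_iff (n : Nat) (best : Int → Int → Int) (num : Nat → Int)
    (dom : Int → Int → Prop)
    (hiff : ∀ a b, best a b = a ↔ dom a b)
    (hb1 : ∀ a b, dom (best a b) a) (hb2 : ∀ a b, dom (best a b) b)
    (htrans : ∀ {a b c : Int}, dom a b → dom b c → dom a c) :
    (∀ j, j < n → pvM n best num j = num j)
      ↔ (∀ i, i < n →
           (2 * i + 1 < n → dom (num i) (num (2 * i + 1))) ∧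
           (2 * i + 2 < n → dom (num i) (num (2 * i + 2)))) := by
  have hchild1 : ∀ j, 2 * j + 1 < n → dom (pvM n best num j) (pvM n best num (2 * j + 1)) := by
    intro j h1
    rw [pvM]
    by_cases h2 : 2 * j + 2 < n
    · simp only [h2, h1, dif_pos]
      exact htrans (hb1 _ _) (hb2 _ _)
    · simp only [h2, h1, dif_neg, not_false_iff, dif_pos]
      exact hb2 _ _
  have hchild2 : ∀ j, 2 * j + 2 < n → dom (pvM n best num j) (pvM n best num (2 * j + 2)) := by
    intro j h2
    rw [pvM]
    simp only [h2, dif_pos]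
    exact hb2 _ _
  constructor
  · intro hfix i hi
    constructor
    · intro h1
      have := hchild1 i h1
      rwa [hfix i hi, hfix (2 * i + 1) h1] at this
    · intro h2
      have := hchild2 i h2
      rwa [hfix i hi, hfix (2 * i + 2) h2] at this
  · intro H
    have key : ∀ fuel j, j < n → n - j ≤ fuel → pvM n best num j = num j := by
      intro fuel
      induction fuel with
      | zero => intro j hj hf; omega
      | succ f ih =>
        intro j hj hf
        rcases H j hj with ⟨h1, h2⟩
        rw [pvM]
        by_cases c1 : 2 * j + 1 < n <;> by_cases c2 : 2 * j + 2 < n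
        · rw [dif_pos c2, dif_pos c1, ih (2 * j + 1) c1 (by omega), ih (2 * j + 2) c2 (by omega),
              (hiff _ _).mpr (h1 c1), (hiff _ _).mpr (h2 c2)]
        · rw [dif_neg c2, dif_pos c1, ih (2 * j + 1) c1 (by omega), (hiff _ _).mpr (h1 c1)]
        · omega
        · rw [dif_neg c2, dif_neg c1]
    exact fun j hj => key (n - j) j hj (le_refl _)

lemma pvGetD_map (heap : List (List (String × Int))) (i : Nat) (hi : i < heap.length) :
    (heap.map (fun row => pvNum row)).getD i 0 = pvNum (heap.getD i []) := by
  rw [List.getD_eq_getElem?_getD, List.getD_eq_getElem?_getD, List.getElem?_map]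
  rw [List.getElem?_eq_getElem hi]
  simp

-- one generic side-by-side equivalence, instantiated with max/< and min/>
lemma pvSide_eq (heap : List (List (String × Int)))
    (best : Int → Int → Int) (R : Int → Int → Bool) (dom : Int → Int → Prop)
    (hiff : ∀ a b, best a b = a ↔ dom a b)
    (hb1 : ∀ a b, dom (best a b) a) (hb2 : ∀ a b, dom (best a b) b)
    (htrans : ∀ {a b c : Int}, dom a b → dom b c → dom a c)
    (hR : ∀ a b, R a b = false ↔ dom a b) :
    ((List.range heap.length).all (fun i =>
      !((decide (2 * i + 1 < heap.length) && R (pvNum (heap.getD i [])) (pvNum (heap.getD (2 * i + 1) []))) ||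
        (decide (2 * i + 2 < heap.length) && R (pvNum (heap.getD i [])) (pvNum (heap.getD (2 * i + 2) []))))))
    =
    ((List.range heap.length).all (fun i =>
      (((List.range heap.length).reverse).foldl (pvSink heap.length best)
          (heap.map (fun row => pvNum row))).getD i 0 == pvNum (heap.getD i []))) := by
  set n := heap.length with hn
  have hlen : (heap.map (fun row => pvNum row)).length = n := by simp [hn]
  have hrange : List.range n = List.range' 0 (n - 0) := by simp [List.range_eq_range']
  have hfold : ∀ j, j < n →
      (((List.range n).reverse).foldl (pvSink n best) (heap.map (fun row => pvNum row))).getD j 0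
        = pvM n best (fun t => (heap.map (fun row => pvNum row)).getD t 0) j := by
    intro j hj
    rw [hrange, pvFoldInv n best _ hlen 0 (by omega) j]
    simp [hj]
  rw [Bool.eq_iff_iff]
  simp only [List.all_eq_true, List.mem_range, Bool.not_eq_true', Bool.or_eq_false_iff,
    Bool.and_eq_false_iff, decide_eq_false_iff_not, not_lt, beq_iff_eq]
  have hbridge : ∀ i, i < n → (heap.map (fun row => pvNum row)).getD i 0 = pvNum (heap.getD i []) := by
    intro i hi; exact pvGetD_map heap i (hn ▸ hi)
  constructor
  · intro H j hj
    rw [hfold j hj]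
    have hprop : ∀ i, i < n →
        (2 * i + 1 < n → dom ((heap.map (fun row => pvNum row)).getD i 0) ((heap.map (fun row => pvNum row)).getD (2 * i + 1) 0)) ∧
        (2 * i + 2 < n → dom ((heap.map (fun row => pvNum row)).getD i 0) ((heap.map (fun row => pvNum row)).getD (2 * i + 2) 0)) := by
      intro i hi
      rcases H i hi with ⟨hL, hR'⟩
      constructor
      · intro hc
        rw [hbridge i hi, hbridge _ hc]
        rcases hL with h | h
        · omega
        · exact (hR _ _).mp h
      · intro hc
        rw [hbridge i hi, hbridge _ hc]
        rcases hR' with h | h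
        · omega
        · exact (hR _ _).mp h
    have := (pvM_fixed_iff n best _ dom hiff hb1 hb2 htrans).mpr hprop j hj
    rw [this, hbridge j hj]
  · intro H i hi
    have hfix : ∀ j, j < n → pvM n best (fun t => (heap.map (fun row => pvNum row)).getD t 0) j
        = (heap.map (fun row => pvNum row)).getD j 0 := by
      intro j hj
      have := H j hj
      rw [hfold j hj] at this
      rw [this, hbridge j hj]
    have := (pvM_fixed_iff n best _ dom hiff hb1 hb2 htrans).mp hfix i hi
    rcases this with ⟨hL, hR'⟩
    constructor
    · by_cases hc : 2 * i + 1 < n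
      · right
        rw [hR, ← hbridge i hi, ← hbridge _ hc]
        exact hL hc
      · left; omega
    · by_cases hc : 2 * i + 2 < n
      · right
        rw [hR, ← hbridge i hi, ← hbridge _ hc]
        exact hR' hc
      · left; omega

-- ===== VERDICT (by name: the statement is the Claim_ definition above) =====
theorem check_heap_spec : Claim_equal_check_heap := by
  intro heap is_max_heap _hdom _hpre
  unfold Spec_check_heap check_heap check_heap_alt pvIsMaxHeapFunc pvIsMinHeapFunc
  cases is_max_heap
  · -- min-heap: best = min, dom a b := a ≤ b, R p c := decide (p > c)
    simp only [Bool.false_eq_true, if_neg (fun h => False.elim h)]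
    exact pvSide_eq heap (fun a b => min a b) (fun p c => decide (p > c)) (fun a b => a ≤ b)
      (fun a b => min_eq_left_iff) (fun a b => min_le_left a b) (fun a b => min_le_right a b)
      (fun {a b c} => le_trans)
      (by intro a b; simp)
  · -- max-heap: best = max, dom a b := b ≤ a, R p c := decide (p < c)
    exact pvSide_eq heap (fun a b => max a b) (fun p c => decide (p < c)) (fun a b => b ≤ a)
      (fun a b => max_eq_left_iff) (fun a b => le_max_left a b) (fun a b => le_max_right a b)
      (fun {a b c} h1 h2 => le_trans h2 h1)
      (by intro a b; simp)
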